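-- pv_equiv track=rewrite | github.com/221RDB093/biggest-increase | main.py | biggest_increase
-- ===== SOURCE A (Python) =====
-- def biggest_increase(arr):
--     startValue = arr[0]  # Pieņemu, ka pirmais elements ir mazākais
--     maxRange = 0
--     for i in range(1, len(arr)):  # Iterēju caur masīva indeksiem (atskaitot nulto)
--         num = arr[i] # num = patreizējā (šīs iterācijas) masīva elementa vērtība
--
--         if num - startValue > maxRange: # ja starpība ir starp patreizējo un sākuma skaitli ir lielāka par maksimālo, tad
--             maxRange = num - startValue # turpmāk tā tiks uzskatīta par maksimālo
--         if num < startValue: # ja patreizējais skaitlis ir mazāks par sākumskaitli, tad turpmāk šis skaitlis tiks uzskatīts par mazāko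
--             startValue = num
--     return maxRange
-- ===== SOURCE B (Python) =====
-- def biggest_increase(arr):
--     # Two passes: materialize the prefix-minimum table, then take the best rise.
--     prefmin = []
--     m = arr[0]
--     for x in arr:
--         if x < m:
--             m = x
--         prefmin.append(m)
--     return max(x - p for x, p in zip(arr, prefmin))
-- ===== Notes on version B (the rewrite author's own statement) =====
-- stated objective: alternative
-- what changed: Replaces the single interleaved loop carrying (startValue, maxRange) by two separately-shaped passes: one pass materializes a prefix-minimum table, a second pass takes the maximum of element-minus-prefix-minimum differences; the first difference is always zero, supplying the floor that A's zero-initialized maxRange provides.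
import Mathlib
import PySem

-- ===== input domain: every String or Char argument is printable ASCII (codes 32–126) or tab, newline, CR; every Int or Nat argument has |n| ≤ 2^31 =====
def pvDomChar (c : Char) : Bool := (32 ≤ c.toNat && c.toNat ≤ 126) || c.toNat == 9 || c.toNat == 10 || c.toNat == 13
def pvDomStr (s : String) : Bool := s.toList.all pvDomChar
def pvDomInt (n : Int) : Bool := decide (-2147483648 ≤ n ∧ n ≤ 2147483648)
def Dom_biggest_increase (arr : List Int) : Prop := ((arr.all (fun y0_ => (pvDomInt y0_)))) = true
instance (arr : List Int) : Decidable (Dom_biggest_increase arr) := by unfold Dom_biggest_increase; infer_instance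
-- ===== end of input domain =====

-- B replaces A's interleaved (startValue, maxRange) loop by a materialized prefix-minimum
-- table plus a separate max pass over the differences (alternative decomposition, same cost).

-- ===== PORT A =====
def biggest_increase (arr : List Int) : Int :=
  match PySem.List.pyGet? arr 0 with
  | none => 0  -- arr[0] raises IndexError; excluded by Pre_
  | some startValue0 =>
    (((PySem.List.pyRange 1 (arr.length : Int) 1).foldl
      (fun (st : Int × Int) i =>
        let num := PySem.List.pyGetD arr i 0
        let maxRange := if num - st.1 > st.2 then num - st.1 else st.2
        let startValue := if num < st.1 then num else st.1
        (startValue, maxRange)) (startValue0, 0))).2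

-- ===== PORT B =====
def biggest_increase_alt (arr : List Int) : Int :=
  match PySem.List.pyGet? arr 0 with
  | none => 0  -- arr[0] raises IndexError; excluded by Pre_
  | some m0 =>
    let prefmin := (arr.foldl
      (fun (st : List Int × Int) x =>
        let m := if x < st.2 then x else st.2
        (st.1 ++ [m], m)) ([], m0)).1
    (PySem.List.max? ((arr.zip prefmin).map (fun p => p.1 - p.2)) (fun y => y)).getD 0

-- ===== PRECONDITION & SPEC =====
-- Python A raises IndexError on the empty list (arr[0]); excluded.
def Pre_biggest_increase (arr : List Int) : Prop := arr ≠ []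
instance (arr : List Int) : Decidable (Pre_biggest_increase arr) := by unfold Pre_biggest_increase; infer_instance
def pvWitness_biggest_increase : List Int := [3, 1, 4, 1, 5]
def Spec_biggest_increase (arr : List Int) (out : Int) : Prop := out = biggest_increase_alt arr
instance (arr : List Int) (out : Int) : Decidable (Spec_biggest_increase arr out) := by unfold Spec_biggest_increase; infer_instance

-- ===== CLAIM (what is proved, stated in full; the proofs are below) =====
def Claim_equal_biggest_increase : Prop := ∀ (arr : List Int), Dom_biggest_increase arr → Pre_biggest_increase arr → Spec_biggest_increase arr (biggest_increase arr)

-- ===== LEMMAS AND PROOFS =====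

-- A's loop body as a named step function
def stepA (st : Int × Int) (num : Int) : Int × Int :=
  (if num < st.1 then num else st.1, if num - st.1 > st.2 then num - st.1 else st.2)

-- the prefix-minimum list produced by B's first pass, in recursive form
def scanMin (s : Int) : List Int → List Int
  | [] => []
  | x :: t => (if x < s then x else s) :: scanMin (if x < s then x else s) t

-- B's pair-fold computes (acc ++ scanMin, running min)
lemma fold_prefmin (t : List Int) (acc : List Int) (s : Int) :
    (t.foldl (fun (st : List Int × Int) x =>
      (st.1 ++ [if x < st.2 then x else st.2], if x < st.2 then x else st.2)) (acc, s))
    = (acc ++ scanMin s t, t.foldl (fun m x => if x < m then x else m) s) := by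
  induction t generalizing acc s with
  | nil => simp [scanMin]
  | cons x t ih => simp [scanMin, ih, List.append_assoc]

-- main invariant: A's interleaved fold equals a running max over the diffs against scanMin
lemma stepA_eq_max (t : List Int) (s m : Int) (hm : 0 ≤ m) :
    (t.foldl stepA (s, m)).2
      = ((t.zip (scanMin s t)).map (fun p => p.1 - p.2)).foldl max m := by
  induction t generalizing s m with
  | nil => rfl
  | cons x t ih =>
    have hmax : (if x - s > m then x - s else m)
        = max m (x - (if x < s then x else s)) := by
      split_ifs with h1 h2 h2 <;> omega
    have hm' : 0 ≤ (if x - s > m then x - s else m) := by split_ifs <;> omega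
    simp only [scanMin, List.zip_cons_cons, List.map_cons, List.foldl_cons, stepA]
    rw [ih _ _ hm', hmax]

theorem biggest_increase_spec : Claim_equal_biggest_increase := by
  intro arr _ hpre
  unfold Spec_biggest_increase biggest_increase biggest_increase_alt
  match arr with
  | [] => exact absurd rfl hpre
  | a :: t =>
    simp only [PySem.List.pyGet?_zero_cons]
    rw [PySem.List.foldl_pyRange_pyGetD' (a := 1) (xs := a :: t) (d := 0)
      (f := fun (st : Int × Int) num =>
        (if num < st.1 then num else st.1, if num - st.1 > st.2 then num - st.1 else st.2))
      (init := (a, 0)) (by omega)]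
    simp only [Int.toNat_one, List.drop_succ_cons, List.drop_zero]
    have hA : (t.foldl (fun (st : Int × Int) num =>
        (if num < st.1 then num else st.1, if num - st.1 > st.2 then num - st.1 else st.2))
        (a, 0)) = t.foldl stepA (a, 0) := rfl
    rw [hA, stepA_eq_max t a 0 le_rfl]
    rw [show ((a :: t).foldl (fun (st : List Int × Int) x =>
        (st.1 ++ [if x < st.2 then x else st.2], if x < st.2 then x else st.2)) ([], a))
      = _ from fold_prefmin (a :: t) [] a]
    simp only [List.nil_append, scanMin]
    have ha : (if a < a then a else a) = a := by split_ifs <;> rfl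
    rw [ha]
    simp only [List.zip_cons_cons, List.map_cons, sub_self]
    rw [PySem.List.max?_id_cons]
    rfl
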